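-- pv_equiv track=rewrite | github.com/DatDLuu/Short_Python_Algorithm | challenge/oddSumSeq.py | oddSumSequence
-- ===== SOURCE A (Python) =====
-- def oddSumSequence(arr):
--     rep = dict()
--     step = 0
--
--     while True:
--         # record seen sequence
--         rep[tuple(arr)]=step
--
--         # generating new seq based on rule
--         sum = 0
--         for i,v in enumerate(arr):
--             if not arr[i]%2 == 0:
--                 sum+=arr[i]
--             arr[i]=sum
--
-- 	# return first seen of the repeating seq
--         step+=1
--         if tuple(arr) in rep:
--             return rep[tuple(arr)]
-- ===== SOURCE B (Python) =====
-- def oddSumSequence(arr):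
--     # Floyd tortoise-hare cycle detection on the odd-prefix-sum transform.
--     # Works on fresh lists; unlike A it does not mutate arr (return value is the same).
--     def step(xs):
--         s = 0
--         out = []
--         for v in xs:
--             if v % 2:
--                 s += v
--             out.append(s)
--         return out
--
--     tort = step(arr)
--     hare = step(step(arr))
--     while tort != hare:
--         tort = step(tort)
--         hare = step(step(hare))
--     # hare sits on a state inside the cycle; walk two aligned pointers to the cycle start
--     mu = 0
--     tort = list(arr)
--     while tort != hare:
--         tort = step(tort)
--         hare = step(hare)
--         mu += 1
--     return mu
-- ===== Notes on version B (the rewrite author's own statement) =====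
-- stated objective: alternative
-- what changed: Replaced A's dict-of-all-seen-states cycle detector with Floyd tortoise/hare two-pointer cycle detection (a second aligned walk then recovers the first-seen step mu), keeping O(1)-many states instead of every seen state; B works on copies and does not mutate arr, A does (return value is identical).
import Mathlib
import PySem

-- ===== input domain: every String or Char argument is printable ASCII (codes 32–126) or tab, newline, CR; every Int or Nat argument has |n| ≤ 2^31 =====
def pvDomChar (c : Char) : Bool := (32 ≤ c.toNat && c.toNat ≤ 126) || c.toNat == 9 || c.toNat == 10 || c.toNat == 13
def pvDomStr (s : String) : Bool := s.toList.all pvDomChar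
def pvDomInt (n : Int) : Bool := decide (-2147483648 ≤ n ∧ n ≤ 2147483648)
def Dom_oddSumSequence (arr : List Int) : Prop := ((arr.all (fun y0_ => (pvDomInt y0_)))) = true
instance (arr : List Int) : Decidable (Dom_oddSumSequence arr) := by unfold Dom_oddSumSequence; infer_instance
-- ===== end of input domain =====

-- B replaces A's dict-of-all-seen-states cycle detector by Floyd tortoise/hare two-pointer
-- cycle detection (an alternative algorithm keeping O(1)-many states instead of all seen
-- states); equivalence is about the RETURN value only: A mutates arr in place, B does not.
-- Both loops are 'while True' in Python; the ports run them on the arithmetic fuel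
-- 4^(len+1) / 4^(2*len+2), proved sufficient below (pv_stop_lt / pv_meet_le), so the
-- fuel only makes the literal loops total.

-- ===== PORT A =====
def pvLoopA : ℕ → PySem.Dict (List Int) Int → List Int → Int → Int
  | 0, _, _, _ => 0
  | fuel+1, rep, arr, step =>
      let rep' := rep.insert arr step
      let arr' := (arr.foldl (fun (st : Int × List Int) v =>
          if !(PySem.Int.mod v 2 == 0) then (st.1 + v, st.2 ++ [st.1 + v])
          else (st.1, st.2 ++ [st.1])) (0, ([] : List Int))).2
      let step' := step + 1
      match rep'.get? arr' with
      | some j => j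
      | none => pvLoopA fuel rep' arr' step'

def oddSumSequence (arr : List Int) : Int := pvLoopA (4 ^ (arr.length + 1)) PySem.Dict.empty arr 0

-- ===== PORT B =====
def pvStepB (xs : List Int) : List Int :=
  (xs.foldl (fun (st : Int × List Int) v =>
      let s := if (PySem.Int.mod v 2) != 0 then st.1 + v else st.1
      (s, st.2 ++ [s])) (0, ([] : List Int))).2

def pvLoopB1 : ℕ → List Int → List Int → List Int
  | 0, _, hare => hare
  | fuel+1, tort, hare =>
      if tort = hare then hare
      else pvLoopB1 fuel (pvStepB tort) (pvStepB (pvStepB hare))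

def pvLoopB2 : ℕ → List Int → List Int → Int → Int
  | 0, _, _, mu => mu
  | fuel+1, tort, hare, mu =>
      if tort = hare then mu
      else pvLoopB2 fuel (pvStepB tort) (pvStepB hare) (mu + 1)

def oddSumSequence_alt (arr : List Int) : Int :=
  let tort := pvStepB arr
  let hare := pvStepB (pvStepB arr)
  let hare' := pvLoopB1 (4 ^ (2 * arr.length + 2)) tort hare
  pvLoopB2 (4 ^ (arr.length + 1)) arr hare' 0

-- ===== PRECONDITION & SPEC =====
def Spec_oddSumSequence (arr : List Int) (out : Int) : Prop := out = oddSumSequence_alt arr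
instance (arr : List Int) (out : Int) : Decidable (Spec_oddSumSequence arr out) := by unfold Spec_oddSumSequence; infer_instance

-- ===== CLAIM (what is proved, stated in full; the proofs are below) =====
def Claim_equal_oddSumSequence : Prop := ∀ (arr : List Int), Dom_oddSumSequence arr → Spec_oddSumSequence arr (oddSumSequence arr)

-- ===== LEMMAS AND PROOFS =====
-- The shared mathematical model: pvF is one application of the odd-prefix-sum transform,
-- pvSeq x k its k-th iterate; the orbit is eventually periodic with transient+period
-- bounded by 4^(len+1) (pv_evperb), which makes both ports' fuels sufficient.

def pvOdd (v : Int) : Bool := !(PySem.Int.mod v 2 == 0)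
def pvPfx (s : Int) : List Int → List Int
  | [] => []
  | v :: t => (if pvOdd v then s + v else s) :: pvPfx (if pvOdd v then s + v else s) t
def pvF (xs : List Int) : List Int := pvPfx 0 xs
def pvOddSum : List Int → Int
  | [] => 0
  | v :: t => (if pvOdd v then v else 0) + pvOddSum t
def pvSeq (x : List Int) (k : ℕ) : List Int := pvF^[k] x
def pvV (z : List Int) (a : Int) : ℕ → Int
  | 0 => a
  | k+1 => pvOddSum (pvSeq z k) + (if pvOdd (pvV z a k) then pvV z a k else 0)

theorem pvSeq_succ (x : List Int) (k : ℕ) : pvSeq x (k+1) = pvF (pvSeq x k) := by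
  simp [pvSeq, Function.iterate_succ_apply']

theorem pvPfx_append (l₁ l₂ : List Int) : ∀ s, pvPfx s (l₁ ++ l₂) = pvPfx s l₁ ++ pvPfx (s + pvOddSum l₁) l₂ := by
  induction l₁ with
  | nil => intro s; simp [pvPfx, pvOddSum]
  | cons v t ih =>
      intro s
      simp only [List.cons_append, pvPfx, pvOddSum, ih]
      by_cases h : pvOdd v <;> simp [h, add_assoc]

theorem pvOddSum_append (u : List Int) (c : Int) :
    pvOddSum (u ++ [c]) = pvOddSum u + (if pvOdd c then c else 0) := by
  induction u with
  | nil => simp [pvOddSum]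
  | cons v t ih => simp [pvOddSum, ih]; ring

theorem pvSeq_append (z : List Int) (a : Int) (k : ℕ) :
    pvSeq (z ++ [a]) k = pvSeq z k ++ [pvV z a k] := by
  induction k with
  | zero => simp [pvSeq, pvV]
  | succ k ih =>
      rw [pvSeq_succ, ih, pvSeq_succ]
      show pvPfx 0 (pvSeq z k ++ [pvV z a k]) = _
      rw [pvPfx_append]
      simp only [pvF, pvV, pvPfx, zero_add]
      by_cases h : pvOdd (pvV z a k) <;> simp [h]

theorem pvSeq_nil (k : ℕ) : pvSeq [] k = [] := by
  induction k with
  | zero => rfl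
  | succ k ih => rw [pvSeq_succ, ih]; rfl

theorem pv_sz_eq (z : List Int) (a : Int) (k : ℕ) :
    pvOddSum (pvSeq (z ++ [a]) k) = pvV z a (k+1) := by
  rw [pvSeq_append, pvOddSum_append]
  rfl

-- quantitative version of 'the odd-sum of the orbit is eventually 0 once it is eventually even'
theorem pv_aux_zerob : ∀ (z : List Int) (K : ℕ),
    (∀ k, K ≤ k → pvOdd (pvOddSum (pvSeq z k)) = false) →
    ∃ K', K' ≤ K + z.length ∧ ∀ k, K' ≤ k → pvOddSum (pvSeq z k) = 0 := by
  intro z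
  induction z using List.reverseRecOn with
  | nil => intro K _; exact ⟨0, by simp, fun k _ => by rw [pvSeq_nil]; rfl⟩
  | append_singleton w b ih =>
      intro K hK
      have hVe : ∀ k, K + 1 ≤ k → pvOdd (pvV w b k) = false := by
        intro k hk
        obtain ⟨m, rfl⟩ : ∃ m, k = m + 1 := ⟨k - 1, by omega⟩
        have := hK m (by omega)
        rwa [pv_sz_eq] at this
      have hsw : ∀ k, K + 1 ≤ k → pvOddSum (pvSeq w k) = pvV w b (k+1) := by
        intro k hk
        have h1 := hVe k hk
        show pvOddSum (pvSeq w k) = pvOddSum (pvSeq w k) + (if pvOdd (pvV w b k) then pvV w b k else 0)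
        rw [h1]; simp
      have hswe : ∀ k, K + 1 ≤ k → pvOdd (pvOddSum (pvSeq w k)) = false := by
        intro k hk
        rw [hsw k hk]
        exact hVe (k+1) (by omega)
      obtain ⟨K'', hle'', h''⟩ := ih (K+1) hswe
      refine ⟨max K'' (K+1), by simp; omega, fun k hk => ?_⟩
      rw [pv_sz_eq]
      have h2 : pvV w b (k+1) = pvOddSum (pvSeq w k) := (hsw k (by omega)).symm
      rw [h2, h'' k (by omega)]

theorem pvOdd_add (x y : Int) : pvOdd (x + y) = (pvOdd x != pvOdd y) := by
  simp only [pvOdd, PySem.Int.mod_eq_emod_of_pos (by norm_num : (0:Int) < 2)]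
  have hx := Int.emod_two_eq x
  have hy := Int.emod_two_eq y
  rcases hx with hx | hx <;> rcases hy with hy | hy <;>
    simp [Int.add_emod, hx, hy]

theorem pv_bne_cancel (a b : Bool) : (a != (a != b)) = b := by cases a <;> cases b <;> rfl

theorem pv_p_rec (z : List Int) (a : Int) (k : ℕ) :
    pvOdd (pvV z a (k+1)) = (pvOdd (pvOddSum (pvSeq z k)) != pvOdd (pvV z a k)) := by
  show pvOdd (pvOddSum (pvSeq z k) + (if pvOdd (pvV z a k) then pvV z a k else 0)) = _
  by_cases h : pvOdd (pvV z a k)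
  · rw [if_pos h, pvOdd_add, h]
  · rw [if_neg h, eq_false_of_ne_true h, add_zero]
    cases pvOdd (pvOddSum (pvSeq z k)) <;> rfl

theorem pv_bne_cancel_right (a b : Bool) : ((a != b) != b) = a := by cases a <;> cases b <;> rfl

theorem pv_bne_shuffle (a c b : Bool) : (a != (c != b)) = (c != (a != b)) := by
  cases a <;> cases c <;> cases b <;> rfl

-- eventual periodicity with an explicit 4^(len+1) bound on transient + period
theorem pv_evperb (z : List Int) :
    ∃ K Q, 0 < Q ∧ K + Q ≤ 4 ^ (z.length + 1) ∧ ∀ k, K ≤ k → pvSeq z (k + Q) = pvSeq z k := by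
  induction z using List.reverseRecOn with
  | nil => exact ⟨0, 1, Nat.one_pos, by norm_num, fun k _ => by rw [pvSeq_nil, pvSeq_nil]⟩
  | append_singleton w b ih =>
      obtain ⟨K, Q, hQ, hB, hper⟩ := ih
      have hlen : (w ++ [b]).length = w.length + 1 := by simp
      set s : ℕ → Int := fun k => pvOddSum (pvSeq w k) with hs
      set p : ℕ → Bool := fun k => pvOdd (pvV w b k) with hp
      set f : ℕ → Bool := fun k => pvOdd (s k) with hf
      have hsper : ∀ k, K ≤ k → s (k + Q) = s k := fun k hk => by
        simp only [hs, hper k hk]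
      have hsper2 : ∀ k, K ≤ k → s (k + 2*Q) = s k := fun k hk => by
        have h1 := hsper (k + Q) (by omega)
        have h2 := hsper k hk
        rw [show k + 2*Q = k + Q + Q by ring, h1, h2]
      have hfper : ∀ k, K ≤ k → f (k + Q) = f k := fun k hk => by
        simp only [hf, hsper k hk]
      have hrec : ∀ k, p (k+1) = (f k != p k) := fun k => pv_p_rec w b k
      have hVrec : ∀ k, pvV w b (k+1) = s k + (if p k then pvV w b k else 0) := fun k => rfl
      have hCL : ∀ m, p (K + m + Q) = ((p (K + Q) != p K) != p (K + m)) := by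
        intro m
        induction m with
        | zero => rw [Nat.add_zero, pv_bne_cancel_right]
        | succ m ihm =>
            have e1 : K + (m+1) + Q = (K + m + Q) + 1 := by omega
            have e2 : K + (m+1) = (K + m) + 1 := by omega
            rw [e1, hrec, ihm, hfper (K+m) (by omega), pv_bne_shuffle, e2, hrec]
      have hpper : ∀ k, K ≤ k → p (k + 2*Q) = p k := by
        intro k hk
        obtain ⟨m, rfl⟩ : ∃ m, k = K + m := ⟨k - K, by omega⟩
        have e1 : K + m + 2*Q = K + (m + Q) + Q := by omega
        have e2 : K + (m + Q) = K + m + Q := by omega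
        rw [e1, hCL (m + Q), e2, hCL m, pv_bne_cancel]
      by_cases hcase : ∀ m, m < 2*Q → p (K + m) = true
      · -- p is true on a full period window, hence true forever past K
        have h2 : ∀ m, p (K + m) = true := by
          intro m
          induction m using Nat.strong_induction_on with
          | _ m ihm =>
              by_cases hm : m < 2*Q
              · exact hcase m hm
              · have e : K + m = (K + (m - 2*Q)) + 2*Q := by omega
                rw [e, hpper (K + (m - 2*Q)) (by omega)]
                exact ihm (m - 2*Q) (by omega)
        have h2' : ∀ k, K ≤ k → p k = true := by
          intro k hk
          obtain ⟨m, rfl⟩ : ∃ m, k = K + m := ⟨k - K, by omega⟩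
          exact h2 m
        have hfz : ∀ k, K ≤ k → f k = false := by
          intro k hk
          have ha := h2' k hk
          have hb := h2' (k+1) (by omega)
          rw [hrec k, ha] at hb
          cases hq : f k
          · rfl
          · rw [hq] at hb; exact absurd hb (by decide)
        obtain ⟨K4, hK4le, h4⟩ := pv_aux_zerob w K (fun k hk => by
          have := hfz k hk
          simpa [hf, hs] using this)
        have hVconst : ∀ k, max K K4 ≤ k → ∀ m, pvV w b (k + m) = pvV w b k := by
          intro k hk m
          induction m with
          | zero => rfl
          | succ m ihm =>
              have hz : s (k + m) = 0 := h4 (k+m) (by omega)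
              rw [show k + (m+1) = (k+m) + 1 by omega, hVrec, ihm, hz,
                h2' (k+m) (by omega)]
              simp
        refine ⟨max K K4, Q, hQ, ?_, fun k hk => ?_⟩
        · have hw : w.length + 1 ≤ 4 ^ (w.length + 1) := by
            calc w.length + 1 ≤ 2 ^ (w.length + 1) := by
                  exact Nat.lt_two_pow_self.le.trans (le_refl _) |>.trans (by
                    exact Nat.pow_le_pow_left (by norm_num) _)
            _ ≤ 4 ^ (w.length + 1) := Nat.pow_le_pow_left (by norm_num) _
          have : max K K4 ≤ K + w.length := by
            have := hK4le; omega
          calc max K K4 + Q ≤ K + Q + w.length := by omega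
            _ ≤ 4 ^ (w.length + 1) + 4 ^ (w.length + 1) := by
                have := hw; omega
            _ ≤ 4 ^ ((w ++ [b]).length + 1) := by
                rw [hlen, pow_succ]
                omega
        · rw [pvSeq_append, pvSeq_append, hper k (by omega)]
          have hv : pvV w b (k + Q) = pvV w b k := hVconst k hk Q
          rw [hv]
      · -- some point in the window is even: from just past it the orbit has period 2Q
        push Not at hcase
        obtain ⟨m2, hm2, hk2p⟩ := hcase
        set k2 := K + m2 with hk2
        have hk2K : K ≤ k2 := by omega
        have hk2p' : p k2 = false := by simpa using hk2p
        have hclaim : ∀ m, pvV w b (k2 + 1 + m + 2*Q) = pvV w b (k2 + 1 + m) := by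
          intro m
          induction m with
          | zero =>
              rw [Nat.add_zero, show k2 + 1 + 2*Q = (k2 + 2*Q) + 1 by omega, hVrec,
                hVrec, hsper2 k2 hk2K, hpper k2 hk2K, hk2p']
              simp
          | succ m ihm =>
              rw [show k2 + 1 + (m+1) + 2*Q = (k2 + 1 + m + 2*Q) + 1 by omega, hVrec,
                show k2 + 1 + (m+1) = (k2 + 1 + m) + 1 by omega, hVrec,
                hsper2 (k2 + 1 + m) (by omega)]
              have hpe : p (k2 + 1 + m + 2*Q) = p (k2 + 1 + m) := by
                rw [hp]; simp only []; rw [ihm]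
              rw [hpe, ihm]
        refine ⟨k2 + 1, 2*Q, by omega, ?_, fun k hk => ?_⟩
        · have : k2 + 1 + 2*Q ≤ K + 2*Q + 1 + 2*Q := by omega
          calc k2 + 1 + 2*Q ≤ 4 * (K + Q) := by omega
            _ ≤ 4 * 4 ^ (w.length + 1) := by omega
            _ = 4 ^ ((w ++ [b]).length + 1) := by rw [hlen, pow_succ]; ring
        · rw [pvSeq_append, pvSeq_append]
          have hz : pvSeq w (k + 2*Q) = pvSeq w k := by
            have h1 := hper (k + Q) (by omega)
            have h2' := hper k (by omega)
            rw [show k + 2*Q = k + Q + Q by ring, h1, h2']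
          rw [hz]
          obtain ⟨m, rfl⟩ : ∃ m, k = k2 + 1 + m := ⟨k - (k2+1), by omega⟩
          rw [hclaim m]

theorem pv_exists_repeat (x : List Int) : ∃ k l, k < l ∧ l ≤ 4 ^ (x.length + 1) ∧ pvSeq x l = pvSeq x k := by
  obtain ⟨K, Q, hQ, hB, h⟩ := pv_evperb x
  exact ⟨K, K + Q, by omega, hB, h K le_rfl⟩

def pvStopB (x : List Int) (t : ℕ) : Bool := (List.range (t+1)).any (fun j => pvSeq x (t+1) == pvSeq x j)

theorem pv_ex_stop (x : List Int) : ∃ t, pvStopB x t = true := by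
  obtain ⟨k, l, hkl, _, h⟩ := pv_exists_repeat x
  refine ⟨l - 1, ?_⟩
  simp only [pvStopB, List.any_eq_true, List.mem_range, beq_iff_eq]
  exact ⟨k, by omega, by rw [show l - 1 + 1 = l by omega, h]⟩

def pvStop (x : List Int) : ℕ := Nat.find (pv_ex_stop x)

theorem pv_stop_lt (x : List Int) : pvStop x < 4 ^ (x.length + 1) := by
  obtain ⟨k, l, hkl, hlB, h⟩ := pv_exists_repeat x
  have : pvStop x ≤ l - 1 := by
    apply Nat.find_min'
    simp only [pvStopB, List.any_eq_true, List.mem_range, beq_iff_eq]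
    exact ⟨k, by omega, by rw [show l - 1 + 1 = l by omega, h]⟩
  omega

theorem pv_ex_mu (x : List Int) : ∃ j, j ≤ pvStop x ∧ (pvSeq x (pvStop x + 1) == pvSeq x j) = true := by
  have h := Nat.find_spec (pv_ex_stop x)
  rw [show Nat.find (pv_ex_stop x) = pvStop x from rfl] at h
  simpa only [pvStopB, List.any_eq_true, List.mem_range, Nat.lt_succ_iff] using h

def pvMu (x : List Int) : ℕ := Nat.find (pv_ex_mu x)

def pvLam (x : List Int) : ℕ := pvStop x + 1 - pvMu x

theorem pv_mu_le (x : List Int) : pvMu x ≤ pvStop x := (Nat.find_spec (pv_ex_mu x)).1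

theorem pv_rep (x : List Int) : pvSeq x (pvStop x + 1) = pvSeq x (pvMu x) := by
  unfold pvMu
  simpa using (Nat.find_spec (pv_ex_mu x)).2

theorem pv_lam_pos (x : List Int) : 0 < pvLam x := by
  have := pv_mu_le x; unfold pvLam; omega

theorem pv_per1 (x : List Int) : ∀ k, pvMu x ≤ k → pvSeq x (k + pvLam x) = pvSeq x k := by
  intro k hk
  induction k, hk using Nat.le_induction with
  | base =>
      rw [show pvMu x + pvLam x = pvStop x + 1 by have := pv_mu_le x; unfold pvLam; omega]
      exact pv_rep x
  | succ k hk ihk =>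
      rw [show k + 1 + pvLam x = (k + pvLam x) + 1 by omega, pvSeq_succ, ihk, pvSeq_succ]

theorem pv_perm (x : List Int) : ∀ (m k : ℕ), pvMu x ≤ k → pvSeq x (k + m * pvLam x) = pvSeq x k := by
  intro m
  induction m with
  | zero => simp
  | succ m ihm =>
      intro k hk
      rw [show k + (m+1) * pvLam x = (k + m * pvLam x) + pvLam x by ring,
        pv_per1 x _ (by omega), ihm k hk]

theorem pv_ex_meet (x : List Int) : ∃ m, (pvSeq x (m+1) == pvSeq x (2*(m+1))) = true := by
  have hl := pv_lam_pos x
  refine ⟨pvLam x * (pvMu x + 1) - 1, ?_⟩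
  have hge : 1 ≤ pvLam x * (pvMu x + 1) := by nlinarith
  rw [show pvLam x * (pvMu x + 1) - 1 + 1 = pvLam x * (pvMu x + 1) by omega]
  simp only [beq_iff_eq]
  rw [show 2 * (pvLam x * (pvMu x + 1)) = pvLam x * (pvMu x + 1) + (pvMu x + 1) * pvLam x by ring]
  exact (pv_perm x (pvMu x + 1) _ (by nlinarith)).symm

def pvMeet (x : List Int) : ℕ := Nat.find (pv_ex_meet x) + 1

theorem pv_meet_le (x : List Int) : pvMeet x ≤ 4 ^ (2 * x.length + 2) := by
  have hl := pv_lam_pos x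
  have hge : 1 ≤ pvLam x * (pvMu x + 1) := by nlinarith
  have h1 : pvMeet x ≤ pvLam x * (pvMu x + 1) := by
    unfold pvMeet
    have := Nat.find_min' (pv_ex_meet x) (m := pvLam x * (pvMu x + 1) - 1) (by
      rw [show pvLam x * (pvMu x + 1) - 1 + 1 = pvLam x * (pvMu x + 1) by omega]
      simp only [beq_iff_eq]
      rw [show 2 * (pvLam x * (pvMu x + 1)) = pvLam x * (pvMu x + 1) + (pvMu x + 1) * pvLam x by ring]
      exact (pv_perm x (pvMu x + 1) _ (by nlinarith)).symm)
    omega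
  have hstop := pv_stop_lt x
  have hmu := pv_mu_le x
  have h2 : pvLam x ≤ 4 ^ (x.length + 1) := by unfold pvLam; omega
  have h3 : pvMu x + 1 ≤ 4 ^ (x.length + 1) := by omega
  calc pvMeet x ≤ pvLam x * (pvMu x + 1) := h1
    _ ≤ 4 ^ (x.length + 1) * 4 ^ (x.length + 1) := Nat.mul_le_mul h2 h3
    _ = 4 ^ (2 * x.length + 2) := by rw [← pow_add]; ring_nf

theorem pv_inj (x : List Int) {a b : ℕ} (hab : a < b) (hb : b ≤ pvStop x) :
    pvSeq x a ≠ pvSeq x b := by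
  intro h
  have hmin := Nat.find_min (pv_ex_stop x) (show b - 1 < pvStop x by omega)
  apply hmin
  simp only [pvStopB, List.any_eq_true, List.mem_range, beq_iff_eq]
  exact ⟨a, by omega, by rw [show b - 1 + 1 = b by omega, h]⟩

theorem pv_reduce (x : List Int) (k : ℕ) (hk : pvMu x ≤ k) :
    pvSeq x k = pvSeq x (pvMu x + (k - pvMu x) % pvLam x) ∧
      pvMu x + (k - pvMu x) % pvLam x ≤ pvStop x := by
  have hl := pv_lam_pos x
  have hmu := pv_mu_le x
  constructor
  · have h0 := Nat.div_add_mod (k - pvMu x) (pvLam x)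
    have hdiv : k = (pvMu x + (k - pvMu x) % pvLam x) + ((k - pvMu x) / pvLam x) * pvLam x := by
      rw [Nat.mul_comm ((k - pvMu x) / pvLam x) (pvLam x)]
      omega
    conv_lhs => rw [hdiv]
    exact pv_perm x _ _ (by omega)
  · have : (k - pvMu x) % pvLam x < pvLam x := Nat.mod_lt _ hl
    unfold pvLam at *
    omega

theorem pv_tail_ne (x : List Int) {a b : ℕ} (ha : a < pvMu x) (hb : pvMu x ≤ b) :
    pvSeq x a ≠ pvSeq x b := by
  obtain ⟨hred, hle⟩ := pv_reduce x b hb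
  rw [hred]
  exact pv_inj x (by omega) hle

theorem pv_dvd (x : List Int) {k d : ℕ} (_hk : pvMu x ≤ k) (hd : 0 < d)
    (h : pvSeq x (k + d) = pvSeq x k) : pvLam x ∣ d := by
  have hl := pv_lam_pos x
  have hmu := pv_mu_le x
  have hfwd : ∀ j, k ≤ j → pvSeq x (j + d) = pvSeq x j := by
    intro j hj
    induction j, hj using Nat.le_induction with
    | base => exact h
    | succ j hj ihj => rw [show j + 1 + d = (j + d) + 1 by omega, pvSeq_succ, ihj, pvSeq_succ]
  have hPk : k ≤ pvLam x * k := Nat.le_mul_of_pos_left k hl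
  obtain ⟨P, hP⟩ : ∃ P, pvLam x * k = P := ⟨_, rfl⟩
  rw [hP] at hPk
  set k' := pvMu x + P with hk'
  have hk'k : k ≤ k' := by omega
  have h1 : pvSeq x (k' + d) = pvSeq x k' := hfwd k' hk'k
  have h2 : pvSeq x k' = pvSeq x (pvMu x) := by
    rw [hk', ← hP, show pvMu x + pvLam x * k = pvMu x + k * pvLam x by ring]
    exact pv_perm x k (pvMu x) le_rfl
  obtain ⟨h3, h4⟩ := pv_reduce x (k' + d) (by omega)
  have h5 : (k' + d - pvMu x) % pvLam x = d % pvLam x := by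
    rw [hk', show pvMu x + P + d - pvMu x = d + P by omega, ← hP,
      show pvLam x * k = k * pvLam x by ring, Nat.add_mul_mod_self_right]
  rw [h5] at h3
  have h6 : pvSeq x (pvMu x + d % pvLam x) = pvSeq x (pvMu x) := by
    rw [← h3, h1, h2]
  by_contra hnd
  have hr : d % pvLam x ≠ 0 := fun hc => hnd (Nat.dvd_of_mod_eq_zero hc)
  exact pv_inj x (show pvMu x < pvMu x + d % pvLam x by omega) (by rw [h5] at h4; omega) h6.symm

theorem pv_meet_eq (x : List Int) : pvSeq x (pvMeet x) = pvSeq x (2 * pvMeet x) := by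
  have := Nat.find_spec (pv_ex_meet x)
  simpa [pvMeet, beq_iff_eq] using this

theorem pv_meet_min (x : List Int) {m : ℕ} (h1 : 1 ≤ m) (h2 : m < pvMeet x) :
    pvSeq x m ≠ pvSeq x (2 * m) := by
  intro h
  have := Nat.find_min (pv_ex_meet x) (show m - 1 < Nat.find (pv_ex_meet x) by unfold pvMeet at h2; omega)
  apply this
  rw [show m - 1 + 1 = m by omega]
  simpa [beq_iff_eq] using h

theorem pv_meet_ge_mu (x : List Int) : pvMu x ≤ pvMeet x := by
  by_contra hlt
  have h1 : 1 ≤ pvMeet x := by unfold pvMeet; omega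
  have hm := pv_meet_eq x
  rcases lt_or_ge (2 * pvMeet x) (pvMu x) with h | h
  · exact pv_inj x (show pvMeet x < 2 * pvMeet x by omega)
      (by have := pv_mu_le x; omega) hm
  · exact pv_tail_ne x (show pvMeet x < pvMu x by omega) h hm

theorem pv_lam_dvd_meet (x : List Int) : pvLam x ∣ pvMeet x := by
  have h1 : 1 ≤ pvMeet x := by unfold pvMeet; omega
  exact pv_dvd x (pv_meet_ge_mu x) (by omega)
    (by rw [show pvMeet x + pvMeet x = 2 * pvMeet x by ring]; exact (pv_meet_eq x).symm)

theorem pv_phase2 (x : List Int) (j : ℕ) :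
    pvSeq x j = pvSeq x (j + pvMeet x) ↔ pvMu x ≤ j := by
  constructor
  · intro h
    by_contra hlt
    exact pv_tail_ne x (show j < pvMu x by omega)
      (by have := pv_meet_ge_mu x; omega) h
  · intro hj
    obtain ⟨c, hc⟩ := pv_lam_dvd_meet x
    rw [hc, show j + pvLam x * c = j + c * pvLam x by ring]
    exact (pv_perm x c j hj).symm

theorem pv_foldA (xs : List Int) : ∀ (s : Int) (acc : List Int),
    (xs.foldl (fun (st : Int × List Int) v =>
        if !(PySem.Int.mod v 2 == 0) then (st.1 + v, st.2 ++ [st.1 + v])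
        else (st.1, st.2 ++ [st.1])) (s, acc)).2 = acc ++ pvPfx s xs := by
  induction xs with
  | nil => intro s acc; simp [pvPfx]
  | cons v t ih =>
      intro s acc
      rcases Bool.eq_false_or_eq_true (pvOdd v) with h | h <;>
      · have h' : (!(PySem.Int.mod v 2 == 0)) = pvOdd v := rfl
        simp only [List.foldl_cons, h', h, Bool.false_eq_true, if_false, if_true, ih, pvPfx,
          List.append_assoc, List.singleton_append]

theorem pv_foldB (xs : List Int) : ∀ (s : Int) (acc : List Int),
    (xs.foldl (fun (st : Int × List Int) v =>
        let s' := if (PySem.Int.mod v 2) != 0 then st.1 + v else st.1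
        (s', st.2 ++ [s'])) (s, acc)).2 = acc ++ pvPfx s xs := by
  induction xs with
  | nil => intro s acc; simp [pvPfx]
  | cons v t ih =>
      intro s acc
      have h' : ((PySem.Int.mod v 2) != 0) = pvOdd v := by
        simp [pvOdd, bne]
      simp only [List.foldl_cons, h', ih, pvPfx, List.append_assoc, List.singleton_append]

def pvFind (x : List Int) (k : ℕ) (w : List Int) : Option Int :=
  ((List.range k).find? (fun j => pvSeq x j == w)).map (fun j => ((j : ℕ) : Int))

theorem pv_find_insert (x : List Int) (k : ℕ) (hk : k ≤ pvStop x)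
    (rep : PySem.Dict (List Int) Int) (hrep : ∀ w, rep.get? w = pvFind x k w) (w : List Int) :
    (rep.insert (pvSeq x k) ((k : ℕ) : Int)).get? w = pvFind x (k+1) w := by
  rw [PySem.Dict.get?_insert, hrep]
  unfold pvFind
  rw [List.range_succ, List.find?_append]
  by_cases h : w = pvSeq x k
  · subst h
    have hnone : (List.range k).find? (fun j => pvSeq x j == pvSeq x k) = none := by
      rw [List.find?_eq_none]
      intro j hj
      simp only [List.mem_range] at hj
      simpa using pv_inj x hj hk
    rw [if_pos rfl, hnone]
    simp
  · rw [if_neg h]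
    have hlast : List.find? (fun j => pvSeq x j == w) [k] = none := by
      have hb : (pvSeq x k == w) = false := by
        simp only [beq_eq_false_iff_ne, ne_eq]
        exact fun hc => h hc.symm
      simp [List.find?, hb]
    rw [hlast]
    cases hres : (List.range k).find? (fun j => pvSeq x j == w) <;> simp

theorem pv_find_fresh (x : List Int) (k : ℕ) (hk : k ≤ pvStop x) :
    pvFind x k (pvSeq x k) = none := by
  unfold pvFind
  rw [show ((List.range k).find? (fun j => pvSeq x j == pvSeq x k)) = none from by
    rw [List.find?_eq_none]
    intro j hj
    simp only [List.mem_range] at hj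
    simpa using pv_inj x hj hk]
  rfl

theorem pv_find_mu (x : List Int) :
    pvFind x (pvStop x + 1) (pvSeq x (pvStop x + 1)) = some ((pvMu x : ℕ) : Int) := by
  unfold pvFind
  cases hres : (List.range (pvStop x + 1)).find? (fun j => pvSeq x j == pvSeq x (pvStop x + 1)) with
  | none =>
      rw [List.find?_eq_none] at hres
      have hmem : pvMu x ∈ List.range (pvStop x + 1) := by
        simp only [List.mem_range]
        have := pv_mu_le x; omega
      exact absurd (by simpa using (pv_rep x).symm) (by simpa using hres (pvMu x) hmem)
  | some j0 =>
      have hp : pvSeq x j0 = pvSeq x (pvStop x + 1) := by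
        have := List.find?_some hres
        simpa using this
      have hm : j0 ≤ pvStop x := by
        have := List.mem_of_find?_eq_some hres
        simp only [List.mem_range] at this
        omega
      have hj0 : j0 = pvMu x := by
        by_contra hne
        rcases Nat.lt_or_ge j0 (pvMu x) with hlt | hge
        · exact pv_inj x hlt (pv_mu_le x) (hp.trans (pv_rep x))
        · exact pv_inj x (show pvMu x < j0 by omega) hm ((pv_rep x).symm.trans hp.symm)
      simp [hj0]

theorem pvStepB_eq (xs : List Int) : pvStepB xs = pvF xs := by
  unfold pvStepB
  rw [pv_foldB]
  rfl

-- A's loop with any sufficient fuel returns mu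
theorem pv_loopA_spec (x : List Int) : ∀ (fuel k : ℕ) (rep : PySem.Dict (List Int) Int),
    k ≤ pvStop x → pvStop x < k + fuel → (∀ w, rep.get? w = pvFind x k w) →
    pvLoopA fuel rep (pvSeq x k) ((k : ℕ) : Int) = ((pvMu x : ℕ) : Int) := by
  intro fuel
  induction fuel with
  | zero => intro k rep hk hfuel hrep; omega
  | succ fuel ih =>
      intro k rep hk hfuel hrep
      simp only [pvLoopA]
      rw [pv_foldA]
      have harr : ([] : List Int) ++ pvPfx 0 (pvSeq x k) = pvSeq x (k + 1) := by
        rw [List.nil_append, pvSeq_succ]; rfl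
      rw [harr, pv_find_insert x k hk rep hrep]
      by_cases hstop : k = pvStop x
      · subst hstop
        rw [pv_find_mu]
      · rw [pv_find_fresh x (k+1) (by omega)]
        have hcast : ((k : ℕ) : Int) + 1 = (((k+1 : ℕ)) : Int) := by push_cast; ring
        rw [hcast]
        exact ih (k+1) _ (by omega) (by omega) (fun w => pv_find_insert x k hk rep hrep w)

theorem pv_A_eq_mu (arr : List Int) : oddSumSequence arr = ((pvMu arr : ℕ) : Int) := by
  unfold oddSumSequence
  have hlt := pv_stop_lt arr
  have := pv_loopA_spec arr (4 ^ (arr.length + 1)) 0 PySem.Dict.empty (by omega) (by omega)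
    (fun w => by rw [PySem.Dict.get?_empty]; rfl)
  simpa using this

theorem pv_loopB1_spec (x : List Int) : ∀ (fuel i : ℕ),
    i + 1 ≤ pvMeet x → pvMeet x ≤ i + fuel →
    pvLoopB1 fuel (pvSeq x (1+i)) (pvSeq x (2+2*i)) = pvSeq x (pvMeet x) := by
  intro fuel
  induction fuel with
  | zero => intro i h1 h2; omega
  | succ fuel ih =>
      intro i h1 h2
      by_cases heq : 1 + i = pvMeet x
      · show (if pvSeq x (1+i) = pvSeq x (2+2*i) then pvSeq x (2+2*i) else _) = _
        have h2i : 2 + 2*i = 2 * pvMeet x := by omega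
        rw [heq, h2i, if_pos (pv_meet_eq x), ← pv_meet_eq x]
      · have hne : pvSeq x (1+i) ≠ pvSeq x (2+2*i) := by
          have := pv_meet_min x (show 1 ≤ i+1 by omega) (show i+1 < pvMeet x by omega)
          rw [show 1 + i = i + 1 by omega, show 2 + 2*i = 2*(i+1) by omega]
          exact this
        show (if pvSeq x (1+i) = pvSeq x (2+2*i) then _ else
            pvLoopB1 fuel (pvStepB (pvSeq x (1+i))) (pvStepB (pvStepB (pvSeq x (2+2*i))))) = _
        rw [if_neg hne, pvStepB_eq, pvStepB_eq, pvStepB_eq, ← pvSeq_succ, ← pvSeq_succ, ← pvSeq_succ]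
        rw [show (1+i)+1 = 1+(i+1) by omega, show (2+2*i+1)+1 = 2+2*(i+1) by omega]
        exact ih (i+1) (by omega) (by omega)

theorem pv_loopB2_spec (x : List Int) : ∀ (fuel j : ℕ),
    j ≤ pvMu x → pvMu x < j + fuel →
    pvLoopB2 fuel (pvSeq x j) (pvSeq x (j + pvMeet x)) ((j : ℕ) : Int) = ((pvMu x : ℕ) : Int) := by
  intro fuel
  induction fuel with
  | zero => intro j h1 h2; omega
  | succ fuel ih =>
      intro j h1 h2
      by_cases heq : j = pvMu x
      · show (if pvSeq x j = pvSeq x (j + pvMeet x) then ((j : ℕ) : Int) else _) = _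
        rw [if_pos ((pv_phase2 x j).mpr (by omega)), heq]
      · have hne : pvSeq x j ≠ pvSeq x (j + pvMeet x) := by
          intro h
          have := (pv_phase2 x j).mp h
          omega
        show (if pvSeq x j = pvSeq x (j + pvMeet x) then _ else
            pvLoopB2 fuel (pvStepB (pvSeq x j)) (pvStepB (pvSeq x (j + pvMeet x))) (((j : ℕ) : Int) + 1)) = _
        rw [if_neg hne, pvStepB_eq, pvStepB_eq, ← pvSeq_succ, ← pvSeq_succ]
        have hcast : ((j : ℕ) : Int) + 1 = (((j+1 : ℕ)) : Int) := by push_cast; ring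
        rw [hcast, show j + pvMeet x + 1 = (j+1) + pvMeet x by omega]
        exact ih (j+1) (by omega) (by omega)

theorem pv_B_eq_mu (arr : List Int) : oddSumSequence_alt arr = ((pvMu arr : ℕ) : Int) := by
  unfold oddSumSequence_alt
  have h1 : pvStepB arr = pvSeq arr (1+0) := by rw [pvStepB_eq]; rfl
  have h2 : pvStepB (pvStepB arr) = pvSeq arr (2+2*0) := by
    rw [pvStepB_eq, pvStepB_eq]
    show pvF (pvF arr) = pvSeq arr 2
    rw [show (2:ℕ) = 1 + 1 from rfl, pvSeq_succ, pvSeq_succ]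
    rfl
  have hme : 1 ≤ pvMeet arr := by unfold pvMeet; omega
  have hmle := pv_meet_le arr
  have hstop := pv_stop_lt arr
  have hmu := pv_mu_le arr
  have hL1 : pvLoopB1 (4 ^ (2 * arr.length + 2)) (pvSeq arr (1+0)) (pvSeq arr (2+2*0)) = pvSeq arr (pvMeet arr) :=
    pv_loopB1_spec arr _ 0 (by omega) (by omega)
  show pvLoopB2 (4 ^ (arr.length + 1)) arr
      (pvLoopB1 (4 ^ (2 * arr.length + 2)) (pvStepB arr) (pvStepB (pvStepB arr))) 0 = _
  rw [h2, h1, hL1]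
  have hL2 := pv_loopB2_spec arr (4 ^ (arr.length + 1)) 0 (by omega) (by omega)
  simpa using hL2

-- ===== VERDICT (by name: the statement is the Claim_ definition above) =====
theorem oddSumSequence_spec : Claim_equal_oddSumSequence := by
  intro arr _
  unfold Spec_oddSumSequence
  rw [pv_A_eq_mu, pv_B_eq_mu]
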